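-- pv_equiv track=rewrite | github.com/Kruglikle/Exercise_balancer_bot | bot.py | distribute_needed_across_units
-- ===== SOURCE A (Python) =====
-- def distribute_needed_across_units(needed_total: int, units: list[str]) -> dict:
--     """Распределяем нужное количество упражнений по юнитам без ограничения 1-3."""
--     if needed_total <= 0 or not units:
--         return {}
--
--     plan = {u: 0 for u in units}
--     idx = 0
--     remaining = needed_total
--
--     while remaining > 0:
--         unit = units[idx % len(units)]
--         plan[unit] += 1
--         remaining -= 1
--         idx += 1
--
--     return {u: c for u, c in plan.items() if c > 0}
-- ===== SOURCE B (Python) =====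
-- def distribute_needed_across_units(needed_total: int, units: list[str]) -> dict:
--     """Closed-form round-robin: each unit position gets base = total//n, plus 1 for the first total%n positions; duplicate names accumulate."""
--     if needed_total <= 0 or not units:
--         return {}
--     q, r = divmod(needed_total, len(units))
--     plan = {}
--     for u in units:
--         plan[u] = plan.get(u, 0) + q
--     for u in units[:r]:
--         plan[u] += 1
--     return {u: c for u, c in plan.items() if c > 0}
-- ===== Notes on version B (the rewrite author's own statement) =====
-- stated objective: alternative
-- what changed: Replaces A's one-ticket-at-a-time while-loop (needed_total iterations of round-robin increments) by a closed-form allocation: each unit position gets base = needed_total // len(units) plus one extra for the first needed_total % len(units) positions (duplicate names accumulate their positions' shares, as in A).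
import Mathlib
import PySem

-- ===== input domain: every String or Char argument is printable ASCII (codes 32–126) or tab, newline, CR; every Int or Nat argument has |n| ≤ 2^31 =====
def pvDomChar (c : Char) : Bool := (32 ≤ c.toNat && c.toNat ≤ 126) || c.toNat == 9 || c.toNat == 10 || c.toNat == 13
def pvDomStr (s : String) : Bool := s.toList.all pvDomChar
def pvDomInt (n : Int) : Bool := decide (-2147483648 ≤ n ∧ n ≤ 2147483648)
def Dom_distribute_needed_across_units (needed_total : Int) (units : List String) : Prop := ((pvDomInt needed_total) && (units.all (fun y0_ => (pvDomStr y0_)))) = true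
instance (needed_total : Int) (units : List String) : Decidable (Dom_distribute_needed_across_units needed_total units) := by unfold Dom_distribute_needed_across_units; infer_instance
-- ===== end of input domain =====

-- B replaces A's one-ticket-at-a-time round-robin loop by the closed form
-- base = needed_total // n with one extra for the first needed_total % n positions.

-- ===== PORT A =====
-- the 'while remaining > 0' loop of A; the 'none' branch is unreachable (idx % len(units) is always in range)
def pvLoopA (units : List String) (plan : PySem.Dict String Int) (idx remaining : Int) : PySem.Dict String Int :=
  if _h : 0 < remaining then
    match PySem.List.pyGet? units (PySem.Int.mod idx (units.length : Int)) with
    | some u => pvLoopA units (plan.modify u 0 (· + 1)) (idx + 1) (remaining - 1)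
    | none => plan
  else plan
termination_by remaining.toNat
decreasing_by omega

def distribute_needed_across_units (needed_total : Int) (units : List String) : List (String × Int) :=
  if needed_total ≤ 0 ∨ units = [] then []
  else
    let plan0 := units.foldl (fun d u => d.insert u 0) PySem.Dict.empty
    let plan := pvLoopA units plan0 0 needed_total
    plan.items.filter (fun p => decide (0 < p.2))

-- ===== PORT B =====
def distribute_needed_across_units_alt (needed_total : Int) (units : List String) : List (String × Int) :=
  if needed_total ≤ 0 ∨ units = [] then []
  else
    let q := PySem.Int.floordiv needed_total (units.length : Int)
    let r := PySem.Int.mod needed_total (units.length : Int)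
    let plan1 := units.foldl (fun d u => d.insert u (d.getD u 0 + q)) PySem.Dict.empty
    let plan2 := (PySem.List.slice units none (some r)).foldl (fun d u => d.modify u 0 (· + 1)) plan1
    plan2.items.filter (fun p => decide (0 < p.2))

-- ===== PRECONDITION & SPEC =====
def Spec_distribute_needed_across_units (needed_total : Int) (units : List String) (out : List (String × Int)) : Prop := out = distribute_needed_across_units_alt needed_total units
instance (needed_total : Int) (units : List String) (out : List (String × Int)) : Decidable (Spec_distribute_needed_across_units needed_total units out) := by unfold Spec_distribute_needed_across_units; infer_instance

-- ===== CLAIM (what is proved, stated in full; the proofs are below) =====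
def Claim_equal_distribute_needed_across_units : Prop := ∀ (needed_total : Int) (units : List String), Dom_distribute_needed_across_units needed_total units → Spec_distribute_needed_across_units needed_total units (distribute_needed_across_units needed_total units)

-- ===== LEMMAS AND PROOFS =====

-- the init dict {u: 0 for u in units} answers 0 to every getD _ 0
lemma pv_init_getD (l : List String) : ∀ (d : PySem.Dict String Int) (u : String),
    d.getD u 0 = 0 → (l.foldl (fun d u => d.insert u 0) d).getD u 0 = 0 := by
  induction l with
  | nil => intro d u h; simpa using h
  | cons x xs ih =>
    intro d u h
    simp only [List.foldl_cons]
    exact ih _ u (by rw [PySem.Dict.getD_insert]; split_ifs <;> simp [h])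

-- B's first loop adds q per occurrence
lemma pv_getD_foldl_insert_add (l : List String) (q : Int) : ∀ (d : PySem.Dict String Int) (u : String),
    (l.foldl (fun d x => d.insert x (d.getD x 0 + q)) d).getD u 0
      = d.getD u 0 + q * l.count u := by
  induction l with
  | nil => intro d u; simp
  | cons x xs ih =>
    intro d u
    simp only [List.foldl_cons]
    rw [ih, PySem.Dict.getD_insert, List.count_cons]
    by_cases hux : u = x
    · subst hux
      simp only [beq_self_eq_true, if_true]
      push_cast; ring
    · have hx : (x == u) = false := beq_eq_false_iff_ne.mpr (Ne.symm hux)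
      rw [if_neg hux, hx]
      simp

-- (range m).map (getD · d) is take m
lemma pv_map_getD_range {α : Type} (xs : List α) (d : α) (m : Nat) (hm : m ≤ xs.length) :
    (List.range m).map (fun i => xs.getD i d) = xs.take m := by
  apply List.ext_getElem
  · simp [Nat.min_eq_left hm]
  · intro i h1 h2
    simp only [List.getElem_map, List.getElem_range, List.getElem_take]
    rw [List.getD_eq_getElem]

-- A's while-loop is a fold of "+1" over the visited unit names
lemma pv_loopA_eq (units : List String) (hn : units ≠ []) : ∀ (t i0 : Nat) (plan : PySem.Dict String Int),
    pvLoopA units plan (i0 : Int) (t : Int)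
      = ((List.range t).map (fun j => units.getD ((i0 + j) % units.length) "")).foldl
          (fun d x => d.modify x 0 (· + 1)) plan := by
  intro t
  induction t with
  | zero => intro i0 plan; rw [pvLoopA]; simp
  | succ t ih =>
    intro i0 plan
    have hlen : 0 < units.length := List.length_pos_of_ne_nil hn
    have hmodlt : i0 % units.length < units.length := Nat.mod_lt _ hlen
    rw [pvLoopA]
    rw [dif_pos (by exact_mod_cast Nat.succ_pos t)]
    rw [PySem.Int.mod_natCast, PySem.List.pyGet?_natCast,
        List.getElem?_eq_getElem hmodlt]
    dsimp only
    have harg1 : (i0 : Int) + 1 = ((i0 + 1 : Nat) : Int) := by push_cast; ring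
    have harg2 : ((t + 1 : Nat) : Int) - 1 = (t : Int) := by push_cast; ring
    rw [harg1, harg2, ih (i0 + 1)]
    rw [List.range_succ_eq_map, List.map_cons, List.foldl_cons, List.map_map]
    have hhead : units.getD ((i0 + 0) % units.length) "" = units[i0 % units.length] := by
      rw [Nat.add_zero, List.getD_eq_getElem _ _ hmodlt]
    rw [hhead]
    congr 1
    apply List.map_congr_left
    intro j _
    simp only [Function.comp_apply]
    congr 2
    omega

-- count of u among the first (a*n + r') round-robin picks, r' < n
lemma pv_count_cycles (units : List String) (hn : units ≠ []) (u : String) :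
    ∀ (a r' : Nat), r' ≤ units.length →
    ((List.range (a * units.length + r')).map (fun j => units.getD (j % units.length) "")).count u
      = a * units.count u + (units.take r').count u := by
  have hlen : 0 < units.length := List.length_pos_of_ne_nil hn
  intro a
  induction a with
  | zero =>
    intro r' hr'
    have : ∀ j ∈ List.range r', units.getD (j % units.length) "" = units.getD j "" := by
      intro j hj
      rw [List.mem_range] at hj
      rw [Nat.mod_eq_of_lt (by omega)]
    rw [Nat.zero_mul, Nat.zero_add, List.map_congr_left this, pv_map_getD_range _ _ _ hr']
    simp
  | succ a ih =>
    intro r' hr'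
    have hsplit : (a + 1) * units.length + r' = units.length + (a * units.length + r') := by ring
    rw [hsplit, List.range_add, List.map_append, List.count_append, List.map_map]
    have hfull : (List.range units.length).map (fun j => units.getD (j % units.length) "") = units := by
      have : ∀ j ∈ List.range units.length, units.getD (j % units.length) "" = units.getD j "" := by
        intro j hj
        rw [List.mem_range] at hj
        rw [Nat.mod_eq_of_lt hj]
      rw [List.map_congr_left this, pv_map_getD_range _ _ _ le_rfl, List.take_length]
    have hshift : (List.range (a * units.length + r')).map
        ((fun j => units.getD (j % units.length) "") ∘ fun x => units.length + x)
        = (List.range (a * units.length + r')).map (fun j => units.getD (j % units.length) "") := by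
      apply List.map_congr_left
      intro j _
      simp only [Function.comp_apply, Nat.add_mod_left]
    rw [hfull, hshift, ih r' hr']
    ring

-- Set.update is a no-op when every element is already present
lemma pv_set_update_self (l : List String) : ∀ (s : PySem.Set String), (∀ x ∈ l, x ∈ s) →
    PySem.Set.update s l = s := by
  induction l with
  | nil => intro s _; simp [PySem.Set.update]
  | cons x xs ih =>
    intro s h
    have hadd : PySem.Set.add s x = s := by
      simp [PySem.Set.add, PySem.Set.contains, h x (by simp)]
    have : PySem.Set.update s (x :: xs) = PySem.Set.update (PySem.Set.add s x) xs := by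
      simp [PySem.Set.update]
    rw [this, hadd]
    exact ih s (fun y hy => h y (by simp [hy]))

-- ===== VERDICT (by name: the statement is the Claim_ definition above) =====
theorem distribute_needed_across_units_spec : Claim_equal_distribute_needed_across_units := by
  intro needed_total units _
  unfold Spec_distribute_needed_across_units
  unfold distribute_needed_across_units distribute_needed_across_units_alt
  by_cases hc : needed_total ≤ 0 ∨ units = []
  · simp [hc]
  · rw [if_neg hc, if_neg hc]
    dsimp only
    push Not at hc
    obtain ⟨hpos, hne⟩ := hc
    have hlen : 0 < units.length := List.length_pos_of_ne_nil hne
    set n := units.length with hn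
    -- Nat versions of the numbers
    set T := needed_total.toNat with hT
    have hTcast : (T : Int) = needed_total := Int.toNat_of_nonneg (by omega)
    have hq : PySem.Int.floordiv needed_total (n : Int) = ((T / n : Nat) : Int) := by
      rw [← hTcast]; exact PySem.Int.floordiv_natCast T n
    have hr : PySem.Int.mod needed_total (n : Int) = ((T % n : Nat) : Int) := by
      rw [← hTcast]; exact PySem.Int.mod_natCast T n
    have hslice : PySem.List.slice units none (some (PySem.Int.mod needed_total (n : Int)))
        = units.take (T % n) := by
      rw [hr, PySem.List.slice_to units (by positivity)]
      congr 1
    -- the two dicts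
    set plan0 : PySem.Dict String Int := units.foldl (fun d u => d.insert u 0) PySem.Dict.empty with hplan0
    set V : List String := (List.range T).map (fun j => units.getD (j % n) "") with hV
    have hA : pvLoopA units plan0 0 needed_total
        = V.foldl (fun d x => d.modify x 0 (· + 1)) plan0 := by
      rw [← hTcast]
      have := pv_loopA_eq units hne T 0 plan0
      rw [show ((0 : Nat) : Int) = 0 from rfl] at this
      rw [this]
      congr 1
      simp only [Nat.zero_add]
      rw [← hn]
    set dA := V.foldl (fun d x => d.modify x 0 (· + 1)) plan0 with hdA
    set plan1 : PySem.Dict String Int :=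
      units.foldl (fun d u => d.insert u (d.getD u 0 + PySem.Int.floordiv needed_total (n : Int))) PySem.Dict.empty with hplan1
    set dB := (units.take (T % n)).foldl (fun d u => d.modify u 0 (· + 1)) plan1 with hdB
    rw [hA, hslice]
    -- keys of both dicts are Set.ofList units
    have hVmem : ∀ x ∈ V, x ∈ units := by
      intro x hx
      rw [hV, List.mem_map] at hx
      obtain ⟨j, _, hj⟩ := hx
      have hlt : j % n < n := Nat.mod_lt _ hlen
      rw [← hj, List.getD_eq_getElem _ _ hlt]
      exact List.getElem_mem _
    have hkeys0 : plan0.keys = PySem.Set.ofList units := by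
      rw [hplan0, PySem.Dict.keys_foldl_insert units (fun _ _ => 0) PySem.Dict.empty,
          PySem.Dict.keys_empty, PySem.Set.ofList_eq_foldl]
      simp [PySem.Set.update]
    have hkeys1 : plan1.keys = PySem.Set.ofList units := by
      rw [hplan1, PySem.Dict.keys_foldl_insert units
            (fun d u => d.getD u 0 + PySem.Int.floordiv needed_total (n : Int)) PySem.Dict.empty,
          PySem.Dict.keys_empty, PySem.Set.ofList_eq_foldl]
      simp [PySem.Set.update]
    have hkeysA : dA.keys = PySem.Set.ofList units := by
      rw [hdA, PySem.Dict.keys_foldl_modify V 0 (fun _ _ => (· + 1)) plan0, hkeys0]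
      exact pv_set_update_self V _ (fun x hx => (PySem.Set.mem_ofList units x).mpr (hVmem x hx))
    have hkeysB : dB.keys = PySem.Set.ofList units := by
      rw [hdB, PySem.Dict.keys_foldl_modify (units.take (T % n)) 0 (fun _ _ => (· + 1)) plan1, hkeys1]
      exact pv_set_update_self _ _
        (fun x hx => (PySem.Set.mem_ofList units x).mpr (List.mem_of_mem_take hx))
    -- values agree everywhere
    have hval : ∀ k, dA.getD k 0 = dB.getD k 0 := by
      intro k
      rw [hdA, hdB, PySem.Dict.getD_foldl_modify_add_one, PySem.Dict.getD_foldl_modify_add_one]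
      have h0 : plan0.getD k 0 = 0 :=
        pv_init_getD units PySem.Dict.empty k (PySem.Dict.getD_empty k 0)
      have h1 : plan1.getD k 0 = ((T / n : Nat) : Int) * units.count k := by
        rw [hplan1, pv_getD_foldl_insert_add, PySem.Dict.getD_empty, hq]
        ring
      have hcount : V.count k = (T / n) * units.count k + (units.take (T % n)).count k := by
        have h1 := pv_count_cycles units hne k (T / n) (T % n) (le_of_lt (Nat.mod_lt T hlen))
        rw [← hn, Nat.div_add_mod'] at h1
        exact h1
      rw [h0, h1, hcount]
      push_cast
      ring
    -- items (hence the filtered items) coincide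
    have hitems : dA.items = dB.items := by
      rw [PySem.Dict.items_eq_map_keys dA (by rw [hkeysA]; exact PySem.Set.nodup_ofList _) 0,
          PySem.Dict.items_eq_map_keys dB (by rw [hkeysB]; exact PySem.Set.nodup_ofList _) 0,
          hkeysA, hkeysB]
      exact List.map_congr_left (fun k _ => by rw [hval k])
    rw [hitems]
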